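-- pv_equiv track=rewrite | github.com/Raiferreira1/Estrutura-de-dados-exercicios | zero_odd_numbers .py | zero_odd_numbers
-- ===== SOURCE A (Python) =====
-- def zero_odd_numbers(num):
--     if num < 10:
--         return 0 if num % 2 == 1 else num
--     else:
--         if num % 2 == 1:
--             return zero_odd_numbers(num // 10) * 10
--
--         else:
--             return zero_odd_numbers(num // 10) * 10 + num % 10
-- ===== SOURCE B (Python) =====
-- def zero_odd_numbers(num):
--     result = 0
--     place = 1
--     n = num
--     while n >= 10:
--         d = n % 10
--         if d % 2 == 0:
--             result += d * place
--         place *= 10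
--         n //= 10
--     if n % 2 == 0:
--         result += n * place
--     return result
-- ===== Notes on version B (the rewrite author's own statement) =====
-- stated objective: alternative
-- what changed: Replaces A's recursion (which multiplies partial results by 10 on the way back up) with a single iterative loop that walks the digits once, threading a place-value multiplier and an additive accumulator.
import Mathlib
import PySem

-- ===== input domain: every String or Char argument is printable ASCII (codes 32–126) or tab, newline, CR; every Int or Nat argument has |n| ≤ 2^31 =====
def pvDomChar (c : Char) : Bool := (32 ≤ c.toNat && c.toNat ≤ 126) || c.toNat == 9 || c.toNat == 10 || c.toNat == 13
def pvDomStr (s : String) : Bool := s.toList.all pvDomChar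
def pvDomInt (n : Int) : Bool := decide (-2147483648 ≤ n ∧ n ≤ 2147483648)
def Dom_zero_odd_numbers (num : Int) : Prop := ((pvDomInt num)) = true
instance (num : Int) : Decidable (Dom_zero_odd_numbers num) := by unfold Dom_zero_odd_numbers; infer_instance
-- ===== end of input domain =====

-- B re-implements A's recursive digit-zeroing as an iterative loop threading a place-value
-- multiplier and an accumulator (objective: alternative decomposition, same cost).


-- ===== PORT A =====
def zero_odd_numbers (num : Int) : Int :=
  if num < 10 then
    if PySem.Int.mod num 2 = 1 then 0 else num
  else
    if PySem.Int.mod num 2 = 1 then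
      zero_odd_numbers (PySem.Int.floordiv num 10) * 10
    else
      zero_odd_numbers (PySem.Int.floordiv num 10) * 10 + PySem.Int.mod num 10
termination_by num.toNat
decreasing_by
  all_goals rw [PySem.Int.floordiv_eq_ediv_of_pos (by omega : (0:Int) < 10)]; omega

-- ===== PORT B =====
-- the while loop of Source B: state (n, place, result)
def zonLoop (n place result : Int) : Int :=
  if n ≥ 10 then
    let d := PySem.Int.mod n 10
    zonLoop (PySem.Int.floordiv n 10) (place * 10)
      (if PySem.Int.mod d 2 = 0 then result + d * place else result)
  else
    if PySem.Int.mod n 2 = 0 then result + n * place else result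
termination_by n.toNat
decreasing_by
  all_goals rw [PySem.Int.floordiv_eq_ediv_of_pos (by omega : (0:Int) < 10)]; omega

def zero_odd_numbers_alt (num : Int) : Int := zonLoop num 1 0

-- ===== PRECONDITION & SPEC =====
def Spec_zero_odd_numbers (num : Int) (out : Int) : Prop := out = zero_odd_numbers_alt num
instance (num : Int) (out : Int) : Decidable (Spec_zero_odd_numbers num out) := by unfold Spec_zero_odd_numbers; infer_instance

-- ===== CLAIM (what is proved, stated in full; the proofs are below) =====
def Claim_equal_zero_odd_numbers : Prop := ∀ (num : Int), Dom_zero_odd_numbers num → Spec_zero_odd_numbers num (zero_odd_numbers num)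

-- ===== LEMMAS AND PROOFS =====

theorem zon_mod_two_mod_ten (n : Int) :
    PySem.Int.mod (PySem.Int.mod n 10) 2 = PySem.Int.mod n 2 := by
  rw [PySem.Int.mod_eq_emod_of_pos (by omega : (0:Int) < 10),
      PySem.Int.mod_eq_emod_of_pos (by omega : (0:Int) < 2),
      PySem.Int.mod_eq_emod_of_pos (by omega : (0:Int) < 2)]
  omega

theorem zonLoop_eq (n p r : Int) : zonLoop n p r = r + p * zero_odd_numbers n := by
  rw [zonLoop, zero_odd_numbers]
  by_cases h : n ≥ 10
  · have ih := zonLoop_eq (PySem.Int.floordiv n 10) (p * 10)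
      (if PySem.Int.mod (PySem.Int.mod n 10) 2 = 0 then r + (PySem.Int.mod n 10) * p else r)
    rw [if_pos h, if_neg (by omega : ¬ n < 10), ih, zon_mod_two_mod_ten]
    have h2 : PySem.Int.mod n 2 = 0 ∨ PySem.Int.mod n 2 = 1 := by
      rw [PySem.Int.mod_eq_emod_of_pos (by omega : (0:Int) < 2)]; omega
    rcases h2 with h2 | h2 <;> simp only [h2] <;> norm_num <;> ring
  · have h2 : PySem.Int.mod n 2 = 0 ∨ PySem.Int.mod n 2 = 1 := by
      rw [PySem.Int.mod_eq_emod_of_pos (by omega : (0:Int) < 2)]; omega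
    rw [if_neg h, if_pos (by omega : n < 10)]
    rcases h2 with h2 | h2 <;> simp only [h2] <;> norm_num <;> ring
termination_by n.toNat
decreasing_by
  all_goals rw [PySem.Int.floordiv_eq_ediv_of_pos (by omega : (0:Int) < 10)]; omega

-- ===== VERDICT (by name: the statement is the Claim_ definition above) =====
theorem zero_odd_numbers_spec : Claim_equal_zero_odd_numbers := by
  intro num _
  unfold Spec_zero_odd_numbers zero_odd_numbers_alt
  rw [zonLoop_eq]
  ring
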